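-- pv_equiv track=rewrite | github.com/matheuscordeiro/Codility | Lessons/Prime and composite numbers/Peaks/solution.py | create_peaks
-- ===== SOURCE A (Python) =====
-- def _peaks(A):
--     peaks = [False] * len(A)
--     for i in range(1, len(A)-1):
--         if A[i-1] < A[i] > A[i+1]:
--             peaks[i] = True
--
--     return peaks
--
-- def create_peaks(A):
--     peaks = _peaks(A)
--     count = 0
--     for key, value in enumerate(peaks):
--         if value:
--             count += 1
--
--         peaks[key] = count
--
--     return peaks, count
-- ===== SOURCE B (Python) =====
-- def create_peaks(A):
--     n = len(A)
--     idxs = [i + 1 for i, (x, y, z) in enumerate(zip(A, A[1:], A[2:])) if x < y > z]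
--     result = []
--     prev = 0
--     for c, p in enumerate(idxs):
--         result += [c] * (p - prev)
--         prev = p
--     result += [len(idxs)] * (n - prev)
--     return result, len(idxs)
-- ===== Notes on version B (the rewrite author's own statement) =====
-- stated objective: alternative
-- what changed: B never builds or rewrites a boolean per-index array: it first collects the list of peak positions from a zip of the array with its two shifts, then constructs the output by run-length block fill (extending with [c]*(gap) runs between consecutive peak positions), returning len(idxs) as the count.
import Mathlib
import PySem

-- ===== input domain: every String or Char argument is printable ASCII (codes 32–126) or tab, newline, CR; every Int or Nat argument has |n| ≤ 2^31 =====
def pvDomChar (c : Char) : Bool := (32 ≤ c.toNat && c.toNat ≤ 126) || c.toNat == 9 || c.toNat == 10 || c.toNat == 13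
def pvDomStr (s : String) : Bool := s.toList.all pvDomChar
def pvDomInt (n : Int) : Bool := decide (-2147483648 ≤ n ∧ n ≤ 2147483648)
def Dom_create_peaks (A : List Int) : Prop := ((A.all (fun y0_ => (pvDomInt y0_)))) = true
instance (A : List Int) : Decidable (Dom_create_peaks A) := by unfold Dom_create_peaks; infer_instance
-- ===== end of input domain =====

-- B replaces A's boolean-array-then-rewrite scheme by collecting the peak positions from a zip of
-- the array with its two shifts and then run-length block-filling the prefix-count output (objective: alternative).

-- ===== PORT A =====
-- helper _peaks: boolean array, set True at interior strict peaks
def pv_peaks (A : List Int) : List Bool :=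
  (PySem.List.pyRange 1 ((A.length : Int) - 1) 1).foldl
    (fun peaks i =>
      if PySem.List.pyGetD A (i-1) 0 < PySem.List.pyGetD A i 0 ∧
         PySem.List.pyGetD A i 0 > PySem.List.pyGetD A (i+1) 0 then
        PySem.List.pySetD peaks i true
      else peaks)
    (List.replicate A.length false)

-- the enumerate loop overwrites every slot in order, so the live list is modelled as Ints
-- (Python's bool ⊂ int: False↦0, True↦1); each position is read (as its original boolean)
-- before it is overwritten, exactly as in Python.
def create_peaks (A : List Int) : List Int × Int :=
  let peaks := pv_peaks A
  (PySem.List.enumerate peaks 0).foldl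
    (fun (st : List Int × Int) kv =>
      let count := if kv.2 = true then st.2 + 1 else st.2
      (PySem.List.pySetD st.1 kv.1 count, count))
    (peaks.map (fun b => if b = true then (1 : Int) else 0), 0)

-- ===== PORT B =====
-- A[1:] and A[2:] are nonnegative-start slices, hence List.drop (exact); zip(A,A[1:],A[2:])
-- is modelled as nested pairs; the comprehension is the append-if fold; 'result += [c]*(k)'
-- is concatenation of a replicate (Python's list*k is empty for k ≤ 0, matching .toNat).
def create_peaks_alt (A : List Int) : List Int × Int :=
  let n := (A.length : Int)
  let idxs := (PySem.List.enumerate (A.zip ((A.drop 1).zip (A.drop 2))) 0).foldl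
      (fun acc kv =>
        if kv.2.1 < kv.2.2.1 ∧ kv.2.2.1 > kv.2.2.2 then acc ++ [kv.1 + 1] else acc) []
  let st := (PySem.List.enumerate idxs 0).foldl
      (fun (st : List Int × Int) cp =>
        (st.1 ++ List.replicate (cp.2 - st.2).toNat cp.1, cp.2)) ([], 0)
  (st.1 ++ List.replicate (n - st.2).toNat (idxs.length : Int), (idxs.length : Int))

-- ===== PRECONDITION & SPEC =====
def Spec_create_peaks (A : List Int) (out : List Int × Int) : Prop := out = create_peaks_alt A
instance (A : List Int) (out : List Int × Int) : Decidable (Spec_create_peaks A out) := by unfold Spec_create_peaks; infer_instance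

-- ===== CLAIM (what is proved, stated in full; the proofs are below) =====
def Claim_equal_create_peaks : Prop := ∀ (A : List Int), Dom_create_peaks A → Spec_create_peaks A (create_peaks A)

-- ===== LEMMAS AND PROOFS =====

-- the (decidable) peak test at index i
def pvPeakCond (A : List Int) (i : Int) : Bool :=
  decide (0 < i ∧ i < (A.length : Int) - 1 ∧
    PySem.List.pyGetD A (i-1) 0 < PySem.List.pyGetD A i 0 ∧
    PySem.List.pyGetD A i 0 > PySem.List.pyGetD A (i+1) 0)

-- peak test at a Nat index
def pvPB (A : List Int) (k : Nat) : Bool := pvPeakCond A (k : Int)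

-- number of True entries, as Int
def pvCnt (bs : List Bool) : Int := (bs.countP id : Int)

-- prefix counts of True entries starting from c
def pvPcs : List Bool → Int → List Int
  | [], _ => []
  | b :: bs, c => (if b then c + 1 else c) :: pvPcs bs (if b then c + 1 else c)

-- positions of the True entries of bs, offset by s
def pvTrueIdx : List Bool → Nat → List Nat
  | [], _ => []
  | b :: bs, s => (if b then [s] else []) ++ pvTrueIdx bs (s+1)

-- run-length fill between consecutive positions, with a final tail up to stop
def pvFill : List Nat → Nat → Nat → Int → List Int
  | [], prev, stop, c => List.replicate (stop - prev) c
  | p :: ps, prev, stop, c => List.replicate (p - prev) c ++ pvFill ps p stop (c+1)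

-- the loop part only (no tail)
def pvFillLoop : List Nat → Nat → Int → List Int
  | [], _, _ => []
  | p :: ps, prev, c => List.replicate (p - prev) c ++ pvFillLoop ps p (c+1)

lemma pvCnt_cons (b : Bool) (bs : List Bool) : pvCnt (b :: bs) = (if b then 1 else 0) + pvCnt bs := by
  cases b <;> simp [pvCnt, List.countP_cons, id] <;> omega

lemma pvTrueIdx_bound (bs : List Bool) (s : Nat) :
    ∀ p ∈ pvTrueIdx bs s, s ≤ p ∧ p < s + bs.length := by
  induction bs generalizing s with
  | nil => simp [pvTrueIdx]
  | cons b bs ih =>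
      intro p hp
      simp only [pvTrueIdx, List.mem_append] at hp
      simp only [List.length_cons]
      rcases hp with hp | hp
      · have hps : p = s := by cases b <;> simp_all
        omega
      · obtain ⟨h1, h2⟩ := ih (s+1) p hp
        omega

lemma pvFill_shift (ps : List Nat) (s stop : Nat) (c : Int)
    (hs : ∀ p ∈ ps, s + 1 ≤ p) (hstop : s + 1 ≤ stop) :
    pvFill ps s stop c = c :: pvFill ps (s+1) stop c := by
  cases ps with
  | nil =>
      have h : stop - s = (stop - (s+1)) + 1 := by omega
      simp [pvFill, h, List.replicate_succ]
  | cons p ps =>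
      have hp : s + 1 ≤ p := hs p (by simp)
      have h : p - s = (p - (s+1)) + 1 := by omega
      simp [pvFill, h, List.replicate_succ]

lemma pvFill_trueIdx (bs : List Bool) (s : Nat) (c : Int) :
    pvFill (pvTrueIdx bs s) s (s + bs.length) c = pvPcs bs c := by
  induction bs generalizing s c with
  | nil => simp [pvTrueIdx, pvFill, pvPcs]
  | cons b bs ih =>
      have hb : ∀ p ∈ pvTrueIdx bs (s+1), s + 1 ≤ p :=
        fun p hp => (pvTrueIdx_bound bs (s+1) p hp).1
      have hlen : s + (b :: bs).length = (s+1) + bs.length := by simp; omega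
      cases b with
      | false =>
          have e : pvTrueIdx (false :: bs) s = pvTrueIdx bs (s+1) := by simp [pvTrueIdx]
          rw [e, hlen, pvFill_shift _ s _ c hb (by omega : s+1 ≤ (s+1)+bs.length), ih]
          simp [pvPcs]
      | true =>
          have e : pvTrueIdx (true :: bs) s = s :: pvTrueIdx bs (s+1) := by simp [pvTrueIdx]
          rw [e, hlen]
          simp only [pvFill, Nat.sub_self, List.replicate_zero, List.nil_append]
          rw [pvFill_shift _ s _ (c+1) hb (by omega : s+1 ≤ (s+1)+bs.length), ih]
          simp [pvPcs]

lemma pvFill_decomp (ps : List Nat) (prev stop : Nat) (c : Int) :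
    pvFill ps prev stop c =
      pvFillLoop ps prev c ++ List.replicate (stop - ps.getLastD prev) (c + (ps.length : Int)) := by
  induction ps generalizing prev c with
  | nil => simp [pvFill, pvFillLoop]
  | cons p ps ih =>
      simp only [pvFill, pvFillLoop, List.getLastD_cons, ih, List.append_assoc, List.length_cons]
      rw [show ((ps.length + 1 : Nat) : Int) = ((ps.length : Nat) : Int) + 1 by push_cast; ring,
        show c + ((ps.length : Int) + 1) = (c + 1) + (ps.length : Int) by ring]

lemma pvTrueIdx_eq_filter (bs : List Bool) (s : Nat) :
    pvTrueIdx bs s = ((List.range bs.length).filter (fun k => bs.getD k false)).map (· + s) := by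
  induction bs generalizing s with
  | nil => simp [pvTrueIdx]
  | cons b bs ih =>
      have hstep : (List.range (b :: bs).length).filter (fun k => (b :: bs).getD k false)
          = (if b then [0] else []) ++
            ((List.range bs.length).filter (fun k => bs.getD k false)).map Nat.succ := by
        have hfm : List.filter (fun k => (b :: bs).getD k false)
              (List.map Nat.succ (List.range bs.length))
            = List.map Nat.succ (List.filter (fun k => bs.getD k false) (List.range bs.length)) := by
          rw [List.filter_map]
          exact congrArg _ (List.filter_congr (fun k _ => by simp))
        rw [List.length_cons, List.range_succ_eq_map, List.filter_cons, hfm]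
        cases b <;> simp
      have h2 : (((List.range bs.length).filter (fun k => bs.getD k false)).map Nat.succ).map (· + s)
          = ((List.range bs.length).filter (fun k => bs.getD k false)).map (· + (s+1)) := by
        rw [List.map_map]
        congr 1
        funext k
        simp [Function.comp]
        omega
      rw [hstep, List.map_append, h2, ← ih (s+1)]
      cases b <;> simp [pvTrueIdx]

-- generic: the append-if fold is filter-then-map
lemma pvFoldlAppendIf {α β : Type} (p : α → Prop) [DecidablePred p] (f : α → β)
    (l : List α) (acc : List β) :
    l.foldl (fun acc x => if p x then acc ++ [f x] else acc) acc
      = acc ++ (l.filter (fun x => decide (p x))).map f := by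
  induction l generalizing acc with
  | nil => simp
  | cons x l ih => by_cases h : p x <;> simp [ih, h]

-- enumerate of a map over range
lemma pvEnumMapRange {α : Type} (g : Nat → α) (m : Nat) :
    PySem.List.enumerate ((List.range m).map g) 0
      = (List.range m).map (fun (k : Nat) => ((k : Int), g k)) := by
  apply List.ext_getElem?
  intro k
  rw [PySem.List.getElem?_enumerate]
  by_cases hk : k < m
  · simp [List.getElem?_map, List.getElem?_range, hk]
  · have h1 : ((List.range m).map g)[k]? = none := by simp; omega
    have h2 : ((List.range m).map (fun (k : Nat) => ((k : Int), g k)))[k]? = none := by simp; omega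
    rw [h1, h2, Option.map_none]

-- zip(A, A[1:], A[2:]) as a map over range
lemma pvZip3 (A : List Int) :
    A.zip ((A.drop 1).zip (A.drop 2))
      = (List.range (A.length - 2)).map
          (fun k => (A.getD k 0, (A.getD (k+1) 0, A.getD (k+2) 0))) := by
  have hlen : (A.zip ((A.drop 1).zip (A.drop 2))).length
      = ((List.range (A.length - 2)).map
          (fun k => (A.getD k 0, (A.getD (k+1) 0, A.getD (k+2) 0)))).length := by
    simp only [List.length_zip, List.length_drop, List.length_map, List.length_range]
    omega
  apply List.ext_getElem hlen
  intro k h1 h2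
  simp only [List.length_zip, List.length_drop] at h1
  have hk : k < A.length - 2 := by omega
  have h1k : 1 + k = k + 1 := by omega
  have h2k : 2 + k = k + 2 := by omega
  simp only [List.getElem_zip, List.getElem_drop, List.getElem_map, List.getElem_range, h1k, h2k]
  rw [List.getD_eq_getElem A 0 (by omega : k < A.length),
    List.getD_eq_getElem A 0 (by omega : k + 1 < A.length),
    List.getD_eq_getElem A 0 (by omega : k + 2 < A.length)]

-- the block-fill fold in closed form
lemma pvFoldFill (qs : List Nat) (prev : Nat) (acc : List Int) (c0 : Nat)
    (h : List.Pairwise (· ≤ ·) (prev :: qs)) :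
    (PySem.List.enumerate (qs.map (fun (j : Nat) => (j : Int))) (c0 : Int)).foldl
      (fun (st : List Int × Int) cp =>
        (st.1 ++ List.replicate (cp.2 - st.2).toNat cp.1, cp.2)) (acc, (prev : Int))
    = (acc ++ pvFillLoop qs prev (c0 : Int), ((qs.getLastD prev : Nat) : Int)) := by
  induction qs generalizing prev acc c0 with
  | nil => simp [PySem.List.enumerate_nil, pvFillLoop]
  | cons p ps ih =>
      rcases List.pairwise_cons.mp h with ⟨hall, hch⟩
      have hle : prev ≤ p := hall p (by simp)
      have hch' : List.Pairwise (· ≤ ·) (p :: ps) := hch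
      simp only [List.map_cons, PySem.List.enumerate_cons, List.foldl_cons]
      have ht : ((p : Int) - (prev : Int)).toNat = p - prev := by omega
      have hc : (c0 : Int) + 1 = ((c0 + 1 : Nat) : Int) := by push_cast; ring
      rw [ht, hc, ih p _ (c0+1) hch']
      simp [pvFillLoop]
      cases ps with
      | nil => simp
      | cons q l =>
          cases hgl : (q :: l).getLast? with
          | none => simp at hgl
          | some x => simp [hgl]

-- qs on the full range, restricted to the interior
lemma pvFilterInterior (A : List Int) :
    (List.range A.length).filter (fun k => pvPB A k)
      = ((List.range (A.length - 2)).filter (fun k => pvPB A (k+1))).map (· + 1) := by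
  have h0 : pvPB A 0 = false := by
    simp [pvPB, pvPeakCond]
  rcases Nat.lt_or_ge A.length 2 with hn | hn
  · interval_cases h : A.length <;> simp_all [pvPB]
  · have hlast : pvPB A ((A.length - 2) + 1) = false := by
      simp only [pvPB, pvPeakCond, decide_eq_false_iff_not]
      rintro ⟨-, h2, -⟩
      have : (((A.length - 2) + 1 : Nat) : Int) = (A.length : Int) - 1 := by
        push_cast [Nat.cast_sub hn]; ring
      omega
    have hsplit : A.length = ((A.length - 2) + 1) + 1 := by omega
    rw [hsplit, List.range_succ_eq_map, List.filter_cons, List.range_succ]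
    simp only [h0, List.filter_map, List.filter_append, List.filter_cons, List.filter_nil, hlast]
    have : ((fun k => pvPB A k) ∘ Nat.succ) = fun k => pvPB A (k+1) := by
      funext k; simp
    simp [this]
    congr 1

-- ---- A-side characterisation (as in the boolean-array port) ----
lemma peaks_partial (A : List Int) (t : Nat) (h1 : 1 ≤ t) (ht : (t : Int) ≤ (A.length : Int) - 1) :
    (PySem.List.pyRange 1 (t : Int) 1).foldl
      (fun peaks i =>
        if PySem.List.pyGetD A (i-1) 0 < PySem.List.pyGetD A i 0 ∧
           PySem.List.pyGetD A i 0 > PySem.List.pyGetD A (i+1) 0 then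
          PySem.List.pySetD peaks i true
        else peaks)
      (List.replicate A.length false)
    = (List.range A.length).map (fun j => pvPB A j && decide (j < t)) := by
  induction t, h1 using Nat.le_induction with
  | base =>
      rw [PySem.List.pyRange_one_eq_nil (by omega), List.foldl_nil]
      apply List.ext_getElem (by simp)
      intro j h1 h2
      simp only [List.getElem_replicate, List.getElem_map, List.getElem_range]
      rcases Nat.eq_zero_or_pos j with hj | hj
      · subst hj; simp [pvPB, pvPeakCond]
      · simp [Nat.not_lt.mpr hj]
  | succ t h1 ih =>
      have hc : ((t + 1 : Nat) : Int) = (t : Int) + 1 := by push_cast; ring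
      rw [hc] at ht ⊢
      rw [PySem.List.pyRange_one_succ_right (by exact_mod_cast h1), List.foldl_append,
        ih (by omega), List.foldl_cons, List.foldl_nil]
      have hPB : pvPB A t = decide
          (PySem.List.pyGetD A ((t : Int)-1) 0 < PySem.List.pyGetD A (t : Int) 0 ∧
           PySem.List.pyGetD A (t : Int) 0 > PySem.List.pyGetD A ((t : Int)+1) 0) := by
        simp only [pvPB, pvPeakCond]
        have h0 : (0 : Int) < (t : Int) := by exact_mod_cast h1
        have h2 : (t : Int) < (A.length : Int) - 1 := by omega
        simp [h0, h2]
        intro _ _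
        exact h1
      by_cases hQ : PySem.List.pyGetD A ((t : Int)-1) 0 < PySem.List.pyGetD A (t : Int) 0 ∧
           PySem.List.pyGetD A (t : Int) 0 > PySem.List.pyGetD A ((t : Int)+1) 0
      · rw [if_pos hQ, PySem.List.pySetD_natCast]
        apply List.ext_getElem (by simp)
        intro j hj1 hj2
        simp only [List.length_map, List.length_range] at hj1 hj2
        simp only [List.getElem_set, List.getElem_map, List.getElem_range]
        rcases eq_or_ne t j with h | h
        · subst h
          rw [if_pos rfl, hPB, decide_eq_true hQ]
          simp
        · rw [if_neg h]
          rw [decide_eq_decide.mpr (show (j < t) ↔ (j < t + 1) by omega)]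
      · rw [if_neg hQ]
        apply List.ext_getElem (by simp)
        intro j hj1 hj2
        simp only [List.getElem_map, List.getElem_range]
        rcases eq_or_ne t j with h | h
        · subst h
          rw [hPB, decide_eq_false hQ]
          simp
        · rw [decide_eq_decide.mpr (show (j < t) ↔ (j < t + 1) by omega)]

lemma peaks_eq (A : List Int) :
    pv_peaks A = (List.range A.length).map (pvPB A) := by
  unfold pv_peaks
  rcases lt_or_ge A.length 2 with hn | hn
  · rw [PySem.List.pyRange_one_eq_nil (by omega), List.foldl_nil]
    interval_cases h : A.length
    · simp
    · apply List.ext_getElem (by simp)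
      intro j hj1 hj2
      simp only [List.length_replicate] at hj1
      have : j = 0 := by omega
      subst this
      simp [pvPB, pvPeakCond]
  · have hc : ((A.length : Int) - 1) = ((A.length - 1 : Nat) : Int) := by
      push_cast [Nat.cast_sub (by omega : 1 ≤ A.length)]; ring
    rw [hc, peaks_partial A (A.length - 1) (by omega) (by rw [← hc])]
    apply List.map_congr_left
    intro j hj
    simp only [List.mem_range] at hj
    by_cases hlt : (j : Int) < (A.length : Int) - 1
    · have : j < A.length - 1 := by omega
      simp [this]
    · have hfalse : pvPB A j = false := by
        simp only [pvPB, pvPeakCond, decide_eq_false_iff_not]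
        intro hcontra
        exact hlt hcontra.2.1
      simp [hfalse]

lemma enum_fold (bs : List Bool) (s : Nat) (st : List Int) (c : Int)
    (h : s + bs.length ≤ st.length) :
    (PySem.List.enumerate bs (s : Int)).foldl
      (fun (st : List Int × Int) kv =>
        let count := if kv.2 = true then st.2 + 1 else st.2
        (PySem.List.pySetD st.1 kv.1 count, count))
      (st, c)
    = (st.take s ++ pvPcs bs c ++ st.drop (s + bs.length), c + pvCnt bs) := by
  induction bs generalizing s st c with
  | nil =>
      simp [PySem.List.enumerate_nil, pvPcs, pvCnt]
  | cons b bs ih =>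
      have hs : s < st.length := by simp at h; omega
      rw [PySem.List.enumerate_cons, List.foldl_cons]
      have hc1 : (s : Int) + 1 = ((s + 1 : Nat) : Int) := by push_cast; ring
      simp only [PySem.List.pySetD_natCast, hc1]
      rw [ih (s + 1) _ _ (by simp at h ⊢; omega)]
      have htake : (st.set s (if b = true then c + 1 else c)).take (s+1)
          = st.take s ++ [if b = true then c + 1 else c] := by
        rw [List.set_eq_take_append_cons_drop, if_pos hs, List.take_append]
        simp [Nat.min_eq_left (le_of_lt hs)]
      have hdrop : (st.set s (if b = true then c + 1 else c)).drop (s + 1 + bs.length)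
          = st.drop (s + (b :: bs).length) := by
        rw [List.drop_set_of_lt (by omega)]
        congr 1
        simp; omega
      rw [htake, hdrop]
      simp only [pvPcs, pvCnt_cons, List.append_assoc, List.singleton_append, Prod.mk.injEq]
      constructor
      · trivial
      · cases b <;> simp <;> omega

-- ===== VERDICT (by name: the statement is the Claim_ definition above) =====
lemma pvB_eq (A : List Int) :
    create_peaks_alt A
      = (pvPcs ((List.range A.length).map (pvPB A)) 0,
         pvCnt ((List.range A.length).map (pvPB A))) := by
  unfold create_peaks_alt
  have hidxs :
      (PySem.List.enumerate (A.zip ((A.drop 1).zip (A.drop 2))) 0).foldl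
        (fun acc kv =>
          if kv.2.1 < kv.2.2.1 ∧ kv.2.2.1 > kv.2.2.2 then acc ++ [kv.1 + 1] else acc)
        ([] : List Int)
      = ((List.range A.length).filter (fun k => pvPB A k)).map (fun (j : Nat) => (j : Int)) := by
    rw [pvZip3 A, pvEnumMapRange, pvFoldlAppendIf, List.nil_append, List.filter_map, List.map_map]
    have hcong : (List.range (A.length - 2)).filter
          ((fun x => decide (x.2.1 < x.2.2.1 ∧ x.2.2.1 > x.2.2.2)) ∘
            (fun (k : Nat) => ((k : Int), (A.getD k 0, (A.getD (k+1) 0, A.getD (k+2) 0)))))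
        = (List.range (A.length - 2)).filter (fun k => pvPB A (k+1)) := by
      apply List.filter_congr
      intro k hk
      simp only [List.mem_range] at hk
      simp only [Function.comp]
      have h1' : (0 : Int) < (k : Int) + 1 := by omega
      have h2' : (k : Int) + 1 < (A.length : Int) - 1 := by omega
      have g1 : PySem.List.pyGetD A ((k : Int) + 1) 0 = A.getD (k+1) 0 := by
        rw [show (k : Int) + 1 = ((k+1 : Nat) : Int) from by push_cast; ring,
          PySem.List.pyGetD_natCast]
      have g2 : PySem.List.pyGetD A ((k : Int) + 1 + 1) 0 = A.getD (k+2) 0 := by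
        rw [show (k : Int) + 1 + 1 = ((k+2 : Nat) : Int) from by push_cast; ring,
          PySem.List.pyGetD_natCast]
      simp [pvPB, pvPeakCond, h1', h2', g1, g2]
    rw [hcong, pvFilterInterior A, List.map_map]
    apply List.map_congr_left
    intro k _
    simp
  rw [hidxs]
  dsimp only
  set qs := (List.range A.length).filter (fun k => pvPB A k) with hqs
  have hqmem : ∀ p ∈ qs, p < A.length := by
    intro p hp
    rw [hqs] at hp
    exact List.mem_range.mp (List.mem_of_mem_filter hp)
  have hchain : List.Pairwise (· ≤ ·) (0 :: qs) :=
    List.pairwise_cons.mpr ⟨fun p _ => Nat.zero_le p,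
      ((List.pairwise_lt_range).filter _).imp le_of_lt⟩
  have hfold := pvFoldFill qs 0 [] 0 hchain
  simp only [Nat.cast_zero] at hfold
  rw [hfold]
  dsimp only
  simp only [List.nil_append, List.length_map]
  have hlast : qs.getLastD 0 ≤ A.length := by
    cases hq : qs with
    | nil => simp
    | cons a l =>
        have he : (a :: l).getLastD 0 = (a :: l).getLast (by simp) := by
          rw [List.getLastD_eq_getLast?, List.getLast?_eq_some_getLast (by simp)]
          rfl
        have hmem : (a :: l).getLast (by simp) ∈ qs := by
          rw [hq]
          exact List.getLast_mem _
        rw [he]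
        exact le_of_lt (hqmem _ hmem)
  have htail : ((A.length : Int) - ((qs.getLastD 0 : Nat) : Int)).toNat
      = A.length - qs.getLastD 0 := by omega
  rw [htail]
  have hdec := pvFill_decomp qs 0 A.length 0
  rw [zero_add] at hdec
  rw [← hdec]
  have hqtrue : pvTrueIdx ((List.range A.length).map (pvPB A)) 0 = qs := by
    rw [pvTrueIdx_eq_filter, hqs]
    have hl : ((List.range A.length).map (pvPB A)).length = A.length := by simp
    rw [hl]
    have hcong : (List.range A.length).filter
          (fun k => ((List.range A.length).map (pvPB A)).getD k false)
        = (List.range A.length).filter (fun k => pvPB A k) := by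
      apply List.filter_congr
      intro k hk
      simp only [List.mem_range] at hk
      rw [List.getD_eq_getElem _ _ (by simp [hk])]
      simp
    rw [hcong]
    simp
  have hfill : pvFill qs 0 A.length 0 = pvPcs ((List.range A.length).map (pvPB A)) 0 := by
    rw [← hqtrue]
    have hblen : ((List.range A.length).map (pvPB A)).length = A.length := by simp
    have h := pvFill_trueIdx ((List.range A.length).map (pvPB A)) 0 0
    rwa [hblen, Nat.zero_add] at h
  have hcnt : pvCnt ((List.range A.length).map (pvPB A)) = (qs.length : Int) := by
    rw [pvCnt, hqs, List.countP_map, ← List.countP_eq_length_filter]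
    rfl
  rw [hfill, hcnt]

lemma pvA_eq (A : List Int) :
    create_peaks A
      = (pvPcs ((List.range A.length).map (pvPB A)) 0,
         pvCnt ((List.range A.length).map (pvPB A))) := by
  unfold create_peaks
  have hA := enum_fold (pv_peaks A) 0
    ((pv_peaks A).map (fun b => if b = true then (1 : Int) else 0)) 0 (by simp)
  simp only [Nat.cast_zero] at hA
  rw [hA]
  have hdrop : ((pv_peaks A).map (fun b => if b = true then (1 : Int) else 0)).drop
      (0 + (pv_peaks A).length) = [] := by
    apply List.drop_eq_nil_of_le
    simp
  rw [hdrop, List.append_nil]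
  simp [peaks_eq]

-- ===== VERDICT (by name: the statement is the Claim_ definition above) =====
theorem create_peaks_spec : Claim_equal_create_peaks := by
  intro A _
  unfold Spec_create_peaks
  rw [pvA_eq, pvB_eq]
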